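-- pv_equiv track=rewrite | github.com/AntelopeIO/DUNES | src/dune/args.py | fix_args
-- ===== SOURCE A (Python) =====
-- def fix_args(args):
--     arg_list = []
--     arg_so_far = ""
--     state = False
--     for arg in args:
--         if not state:
--             if arg.startswith('['):
--                 state = True
--                 arg_so_far = arg[1:]
--                 continue
--             arg_list.append(arg)
--             continue
--         if state:
--             if arg.endswith(']'):
--                 arg_so_far = arg_so_far + arg[:-1]
--                 state = False
--                 arg_list.append(arg_so_far)
--                 arg_so_far = ""
--                 continue
--             arg_so_far = arg_so_far + arg
--
--     return arg_list
-- ===== SOURCE B (Python) =====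
-- def fix_args(args):
--     out = []
--     i, n = 0, len(args)
--     while i < n:
--         head = args[i]
--         if not head.startswith('['):
--             out.append(head)
--             i += 1
--             continue
--         # search-and-slice: find the next ']'-terminated element, join everything between
--         j = next((k for k in range(i + 1, n) if args[k].endswith(']')), None)
--         if j is None:
--             break  # unclosed group: the remainder is consumed and dropped
--         out.append(head[1:] + ''.join(args[i + 1:j]) + args[j][:-1])
--         i = j + 1
--     return out
-- ===== Notes on version B (the rewrite author's own statement) =====
-- stated objective: alternative
-- what changed: Replaces A's element-by-element boolean state machine by a search-and-slice recursion: on an opener it searches for the index of the next ']'-terminated element, emits opener[1:] + ''.join of the slice between + closer[:-1] in one step, and continues past it; an unclosed group ends the scan.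
import Mathlib
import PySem

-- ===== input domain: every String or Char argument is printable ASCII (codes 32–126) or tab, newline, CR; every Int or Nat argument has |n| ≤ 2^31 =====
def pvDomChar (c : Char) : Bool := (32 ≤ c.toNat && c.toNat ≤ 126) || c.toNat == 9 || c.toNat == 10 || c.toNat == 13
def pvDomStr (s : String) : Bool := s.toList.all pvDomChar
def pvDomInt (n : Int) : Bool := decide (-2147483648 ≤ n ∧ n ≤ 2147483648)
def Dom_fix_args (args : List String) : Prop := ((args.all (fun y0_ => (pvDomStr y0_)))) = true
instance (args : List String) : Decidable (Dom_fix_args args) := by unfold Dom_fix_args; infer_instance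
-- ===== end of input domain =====

-- B replaces A's boolean-state machine by a search-and-slice recursion: find the next
-- ']'-terminated element, join the slice between in one step (alternative decomposition; same cost).


-- ===== PORT A =====
-- A's loop as a foldl over the state (arg_list, arg_so_far, state)
def fixStep (st : List String × String × Bool) (arg : String) : List String × String × Bool :=
  match st with
  | (acc, buf, false) =>
    if PySem.Str.startswith arg "[" then (acc, PySem.Str.slice arg (some 1) none, true)
    else (acc ++ [arg], buf, false)
  | (acc, buf, true) =>
    if PySem.Str.endswith arg "]" then (acc ++ [buf ++ PySem.Str.slice arg none (some (-1))], "", false)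
    else (acc, buf ++ arg, true)

def fix_args (args : List String) : List String :=
  (args.foldl fixStep ([], "", false)).1

-- ===== PORT B =====
-- On an opener, find the index j of the first ']'-terminated element of the rest,
-- emit opener[1:] ++ join(rest[:j]) ++ rest[j][:-1], and recurse on rest[j+1:];
-- if there is none, the remainder is dropped.
def fix_args_alt : List String → List String
  | [] => []
  | head :: rest =>
    if PySem.Str.startswith head "[" then
      match rest.findIdx? (fun x => PySem.Str.endswith x "]") with
      | none => []
      | some j =>
        (PySem.Str.slice head (some 1) none
          ++ String.join (rest.take j)
          ++ PySem.Str.slice (rest.getD j "") none (some (-1)))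
          :: fix_args_alt (rest.drop (j + 1))
    else head :: fix_args_alt rest
termination_by l => l.length
decreasing_by
  · simp only [List.length_drop, List.length_cons]; omega
  · simp

-- ===== PRECONDITION & SPEC =====
def Spec_fix_args (args : List String) (out : List String) : Prop := out = fix_args_alt args
instance (args : List String) (out : List String) : Decidable (Spec_fix_args args out) := by unfold Spec_fix_args; infer_instance

-- ===== CLAIM (what is proved, stated in full; the proofs are below) =====
def Claim_equal_fix_args : Prop := ∀ (args : List String), Dom_fix_args args → Spec_fix_args args (fix_args args)

-- ===== LEMMAS AND PROOFS =====
-- What B produces from the rest of the input when a group with buffer buf is open.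
def groupOut (l : List String) (buf : String) : List String :=
  match l.findIdx? (fun x => PySem.Str.endswith x "]") with
  | none => []
  | some j =>
    (buf ++ String.join (l.take j) ++ PySem.Str.slice (l.getD j "") none (some (-1)))
      :: fix_args_alt (l.drop (j + 1))

theorem fix_args_alt_open (head : String) (rest : List String)
    (h : PySem.Str.startswith head "[" = true) :
    fix_args_alt (head :: rest) = groupOut rest (PySem.Str.slice head (some 1) none) := by
  rw [fix_args_alt, if_pos h, groupOut]

theorem str_foldl_append (l : List String) :
    ∀ (s : String),
      List.foldl (fun r x => r ++ x) s l = s ++ List.foldl (fun r x => r ++ x) "" l := by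
  induction l with
  | nil => intro s; simp
  | cons a l ih =>
    intro s
    simp only [List.foldl_cons]
    rw [ih (s ++ a), ih ("" ++ a)]
    simp [String.append_assoc]

-- Invariant of A's fold: the result list is the accumulator followed by what B produces
-- from the remaining input in the corresponding mode.
theorem foldl_fixStep_eq (l : List String) :
    ∀ (acc : List String) (buf : String) (st : Bool),
      (l.foldl fixStep (acc, buf, st)).1
        = acc ++ (cond st (groupOut l buf) (fix_args_alt l)) := by
  induction l with
  | nil =>
    intro acc buf st
    cases st <;> simp [fix_args_alt, groupOut]
  | cons a rest ih =>
    intro acc buf st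
    cases st with
    | false =>
      simp only [List.foldl_cons, fixStep, cond_false]
      by_cases h : PySem.Str.startswith a "[" = true
      · rw [if_pos h, ih]
        simp [fix_args_alt_open a rest h]
      · rw [if_neg h, ih]
        rw [fix_args_alt, if_neg h]
        simp
    | true =>
      simp only [List.foldl_cons, fixStep, cond_true]
      by_cases h : PySem.Str.endswith a "]" = true
      · rw [if_pos h, ih]
        simp only [cond_false]
        rw [groupOut, List.findIdx?_cons, if_pos h]
        simp [String.join]
      · rw [if_neg h, ih]
        simp only [cond_true]
        rw [groupOut, groupOut, List.findIdx?_cons, if_neg h]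
        cases hh : rest.findIdx? (fun x => PySem.Str.endswith x "]") with
        | none => simp
        | some j =>
          simp only [Option.map_some, List.take_succ_cons, List.drop_succ_cons,
            String.join, List.foldl_cons, String.empty_append]
          rw [str_foldl_append (rest.take j) a]
          simp [String.append_assoc]

-- ===== VERDICT (by name: the statement is the Claim_ definition above) =====
theorem fix_args_spec : Claim_equal_fix_args := by
  intro args _
  show fix_args args = fix_args_alt args
  have h := foldl_fixStep_eq args [] "" false
  simpa [fix_args] using h
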